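-- pv_equiv track=rewrite | github.com/HarishMohan9215/HarishCode | MainCode.py | create_tiles
-- ===== SOURCE A (Python) =====
-- def create_tiles(num_decks=1):
--     tiles = []
--
--     colors = ["Orange", "Blue", "Purple", "Red", "Green"]
--
--     for _ in range(num_decks):
--         for color in colors:
--             for value in range(1, 16):
--                 tile_value = "{} {}".format(color, value)
--                 tiles.append(tile_value)
--
--     return tiles
-- ===== SOURCE B (Python) =====
-- def create_tiles(num_decks=1):
--     colors = ["Orange", "Blue", "Purple", "Red", "Green"]
--     return ["{} {}".format(colors[i // 15 % 5], i % 15 + 1)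
--             for i in range(75 * num_decks)]
-- ===== Notes on version B (the rewrite author's own statement) =====
-- stated objective: alternative
-- what changed: Replaces A's three nested loops (decks x colors x values) by one flat comprehension over range(75*num_decks) that computes each tile's color and value from the index i by arithmetic (i//15%5 selects the color, i%15+1 the value).
import Mathlib
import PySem

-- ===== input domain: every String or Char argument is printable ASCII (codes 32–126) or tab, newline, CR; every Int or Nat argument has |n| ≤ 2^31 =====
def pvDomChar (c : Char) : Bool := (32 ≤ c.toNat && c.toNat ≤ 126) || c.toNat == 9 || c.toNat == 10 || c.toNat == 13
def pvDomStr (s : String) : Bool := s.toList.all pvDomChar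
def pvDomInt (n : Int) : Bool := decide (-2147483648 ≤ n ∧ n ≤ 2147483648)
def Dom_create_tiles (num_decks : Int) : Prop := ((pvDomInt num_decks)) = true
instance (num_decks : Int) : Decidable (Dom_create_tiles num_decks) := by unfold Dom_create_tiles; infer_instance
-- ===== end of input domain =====

-- B replaces A's three nested loops with one flat pass over range(75*num_decks),
-- deriving each tile's color and value from the index by arithmetic (objective: alternative).
-- ===== PORT A =====
def create_tiles (num_decks : Int) : List String :=
  let colors : List String := ["Orange", "Blue", "Purple", "Red", "Green"]
  (PySem.List.pyRange 0 num_decks 1).foldl (fun tiles _ =>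
    colors.foldl (fun tiles color =>
      (PySem.List.pyRange 1 16 1).foldl (fun tiles value =>
        tiles ++ [color ++ " " ++ PySem.Int.toStr value]) tiles) tiles) []

-- ===== PORT B =====
-- colors[i // 15 % 5] is always in range (index in [0,5)); pyGetD with default "" is exact here.
def create_tiles_alt (num_decks : Int) : List String :=
  let colors : List String := ["Orange", "Blue", "Purple", "Red", "Green"]
  (PySem.List.pyRange 0 (75 * num_decks) 1).map (fun i =>
    PySem.List.pyGetD colors (PySem.Int.mod (PySem.Int.floordiv i 15) 5) ""
      ++ " " ++ PySem.Int.toStr (PySem.Int.mod i 15 + 1))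

-- ===== PRECONDITION & SPEC =====
def Spec_create_tiles (num_decks : Int) (out : List String) : Prop := out = create_tiles_alt num_decks
instance (num_decks : Int) (out : List String) : Decidable (Spec_create_tiles num_decks out) := by unfold Spec_create_tiles; infer_instance

-- ===== CLAIM =====
def Claim_equal_create_tiles : Prop := ∀ (num_decks : Int), Dom_create_tiles num_decks → Spec_create_tiles num_decks (create_tiles num_decks)

-- ===== LEMMAS AND PROOFS =====

-- the tile produced for a flat index i
def pvTile (i : Int) : String :=
  PySem.List.pyGetD (["Orange", "Blue", "Purple", "Red", "Green"] : List String)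
    (PySem.Int.mod (PySem.Int.floordiv i 15) 5) ""
    ++ " " ++ PySem.Int.toStr (PySem.Int.mod i 15 + 1)

-- the single deck A's two inner loops append
def pvDeck : List String :=
  (["Orange", "Blue", "Purple", "Red", "Green"] : List String).flatMap (fun color =>
    (PySem.List.pyRange 1 16 1).map (fun value => color ++ " " ++ PySem.Int.toStr value))

lemma pv_flatten_map_singleton {α β : Type} (f : α → β) (l : List α) :
    (l.map (fun x => [f x])).flatten = l.map f := by
  induction l with
  | nil => simp
  | cons a t ih => simp [ih]

-- A's inner two loops add exactly pvDeck
lemma pv_inner (tiles : List String) :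
    (["Orange", "Blue", "Purple", "Red", "Green"] : List String).foldl (fun tiles color =>
      (PySem.List.pyRange 1 16 1).foldl (fun tiles value =>
        tiles ++ [color ++ " " ++ PySem.Int.toStr value]) tiles) tiles
    = tiles ++ pvDeck := by
  simp [List.foldl, pvDeck, pv_flatten_map_singleton]

-- A's outer loop repeats the deck k times
lemma pv_outer (k : Nat) (acc : List String) :
    (List.range k).foldl (fun tiles _ => tiles ++ pvDeck) acc
      = acc ++ (List.replicate k pvDeck).flatten := by
  induction k generalizing acc with
  | zero => simp
  | succ n ih =>
      rw [List.range_succ, List.foldl_append, ih]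
      simp [List.replicate_succ']

-- one block of 75 flat indices produces one deck
lemma pv_block : (List.range 75).map (fun (j : Nat) => pvTile (j : Int)) = pvDeck := by decide

-- pvTile only depends on the index modulo 75
lemma pv_shift (m j : Nat) (hj : j < 75) :
    pvTile ((75 * m + j : Nat) : Int) = pvTile (j : Int) := by
  unfold pvTile
  have h1 : PySem.Int.mod ((75 * m + j : Nat) : Int) 15 = PySem.Int.mod (j : Int) 15 := by
    rw [PySem.Int.mod_eq_emod_of_pos (by omega), PySem.Int.mod_eq_emod_of_pos (by omega)]
    push_cast
    omega
  have h2 : PySem.Int.mod (PySem.Int.floordiv ((75 * m + j : Nat) : Int) 15) 5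
      = PySem.Int.mod (PySem.Int.floordiv (j : Int) 15) 5 := by
    rw [PySem.Int.floordiv_eq_ediv_of_pos (by omega),
        PySem.Int.floordiv_eq_ediv_of_pos (by omega),
        PySem.Int.mod_eq_emod_of_pos (by omega), PySem.Int.mod_eq_emod_of_pos (by omega)]
    push_cast
    omega
  rw [h1, h2]

-- B's flat pass over 75*k indices yields k decks
lemma pv_flat (k : Nat) :
    (List.range (75 * k)).map (fun (j : Nat) => pvTile (j : Int))
      = (List.replicate k pvDeck).flatten := by
  induction k with
  | zero => simp
  | succ n ih =>
      have h75 : 75 * (n + 1) = 75 * n + 75 := by ring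
      rw [h75, List.range_add, List.map_append, ih, List.map_map]
      have hblk : (List.range 75).map ((fun (j : Nat) => pvTile (j : Int)) ∘ (fun x => 75 * n + x))
          = pvDeck := by
        rw [← pv_block]
        exact List.map_congr_left (fun j hj => pv_shift n j (List.mem_range.mp hj))
      rw [hblk, List.replicate_succ', List.flatten_append]
      simp

-- ===== VERDICT =====
theorem create_tiles_spec : Claim_equal_create_tiles := by
  intro n _
  unfold Spec_create_tiles create_tiles create_tiles_alt
  simp only [pv_inner]
  rw [PySem.List.pyRange_one 0 n, List.foldl_map, pv_outer]
  rw [PySem.List.pyRange_one 0 (75 * n), List.map_map]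
  have hm : (75 * n - 0).toNat = 75 * (n - 0).toNat := by omega
  rw [hm]
  have hconv : (List.range (75 * (n - 0).toNat)).map
      ((fun i => PySem.List.pyGetD (["Orange", "Blue", "Purple", "Red", "Green"] : List String)
          (PySem.Int.mod (PySem.Int.floordiv i 15) 5) ""
        ++ " " ++ PySem.Int.toStr (PySem.Int.mod i 15 + 1)) ∘ (fun (k : Nat) => (0 : Int) + k))
      = (List.range (75 * (n - 0).toNat)).map (fun (j : Nat) => pvTile (j : Int)) := by
    refine List.map_congr_left (fun j _ => ?_)
    simp [pvTile]
  rw [hconv, pv_flat]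
  simp
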